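-- pv_equiv track=rewrite | github.com/9x25dillon/numbskull | Cognitive_Communication_Organism.py | _semantic_compression
-- ===== SOURCE A (Python) =====
-- from typing import Any, Dict, List, Optional, Tuple, Union, Callable
--
-- def _semantic_compression(message: str, context: Dict[str, Any]) -> str:
--     """Semantic-aware compression preserving meaning"""
--     # Simple semantic compression - remove redundant words while preserving meaning
--     words = message.split()
--     compressed_words = []
--
--     # Keep important words and remove common filler words
--     filler_words = {"the", "a", "an", "and", "or", "but", "in", "on", "at", "to", "for", "of", "with", "by"}
--
--     for word in words:
--         if word.lower() not in filler_words or len(compressed_words) < 3: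
--             compressed_words.append(word)
--
--     return " ".join(compressed_words)
-- ===== SOURCE B (Python) =====
-- def _semantic_compression(message: str, context) -> str:
--     """Semantic-aware compression preserving meaning"""
--     filler_words = {"the", "a", "an", "and", "or", "but", "in", "on", "at", "to", "for", "of", "with", "by"}
--
--     def go(ws, keep):
--         # recursively build the compressed string directly, no intermediate
--         # list and no join: `keep` counts words still kept unconditionally
--         if not ws:
--             return ""
--         w = ws[0]
--         if keep == 0 and w.lower() in filler_words:
--             return go(ws[1:], 0)
--         rest = go(ws[1:], keep - 1 if keep > 0 else 0)
--         return w if rest == "" else w + " " + rest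
--
--     return go(message.split(), 3)
-- ===== Notes on version B (the rewrite author's own statement) =====
-- stated objective: alternative
-- what changed: Replaced A's imperative loop that grows a compressed_words list (with an accumulator-length guard) and joins it at the end by a recursive descent over the word list with a keep-countdown that concatenates the result string directly, with no intermediate list and no join.
import Mathlib
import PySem

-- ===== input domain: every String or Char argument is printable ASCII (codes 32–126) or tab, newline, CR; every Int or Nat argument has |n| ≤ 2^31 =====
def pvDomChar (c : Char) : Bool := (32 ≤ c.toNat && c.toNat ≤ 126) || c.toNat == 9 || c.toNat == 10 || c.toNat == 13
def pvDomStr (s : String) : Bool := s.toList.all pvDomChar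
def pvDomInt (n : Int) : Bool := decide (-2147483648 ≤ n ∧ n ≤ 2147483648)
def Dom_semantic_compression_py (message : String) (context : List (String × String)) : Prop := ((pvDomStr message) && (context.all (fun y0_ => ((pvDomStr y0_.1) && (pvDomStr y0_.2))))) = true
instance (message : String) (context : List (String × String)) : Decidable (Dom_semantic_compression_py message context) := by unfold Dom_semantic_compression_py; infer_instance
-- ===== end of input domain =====

-- B: recursive descent with a keep-countdown that builds the compressed string directly (no intermediate list, no join); alternative decomposition, same O(n) cost.


-- ===== PORT A =====
-- the filler_words set literal (same in A and in B's source)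
def pvFiller : PySem.Set String :=
  PySem.Set.ofList ["the","a","an","and","or","but","in","on","at","to","for","of","with","by"]

def semantic_compression_py (message : String) (context : List (String × String)) : String :=
  let words := PySem.Str.split₀ message
  let compressed_words : List String :=
    words.foldl (fun acc word =>
      if !(PySem.Set.contains pvFiller (PySem.Str.lower word)) || decide (acc.length < 3)
      then acc ++ [word] else acc) []
  PySem.Str.join " " compressed_words

-- ===== PORT B =====
-- B's helper go(ws, keep): Python's `keep - 1 if keep > 0 else 0` is Nat subtraction
def pvGo : List String → Nat → String
  | [], _ => ""
  | w :: rest, keep =>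
    if keep = 0 ∧ PySem.Set.contains pvFiller (PySem.Str.lower w) then pvGo rest 0
    else
      let s := pvGo rest (keep - 1)
      if s = "" then w else w ++ " " ++ s

def semantic_compression_py_alt (message : String) (context : List (String × String)) : String :=
  pvGo (PySem.Str.split₀ message) 3

-- ===== PRECONDITION & SPEC =====
def Spec_semantic_compression_py (message : String) (context : List (String × String)) (out : String) : Prop := out = semantic_compression_py_alt message context
instance (message : String) (context : List (String × String)) (out : String) : Decidable (Spec_semantic_compression_py message context out) := by unfold Spec_semantic_compression_py; infer_instance

-- ===== CLAIM (what is proved, stated in full; the proofs are below) =====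
def Claim_equal_semantic_compression_py : Prop := ∀ (message : String) (context : List (String × String)), Dom_semantic_compression_py message context → Spec_semantic_compression_py message context (semantic_compression_py message context)

-- ===== LEMMAS AND PROOFS =====

-- A's loop step always appends while the accumulator has fewer than 3 elements
theorem pv_step_lt3 (acc : List String) (w : String) (h : acc.length < 3) :
    (if (!(PySem.Set.contains pvFiller (PySem.Str.lower w)) || decide (acc.length < 3)) = true
     then acc ++ [w] else acc) = acc ++ [w] := by
  simp [h]

-- once the accumulator has at least 3 elements, A's loop is a plain filter-append
theorem pv_loop_ge3 (ws : List String) (acc : List String) (h : 3 ≤ acc.length) :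
    ws.foldl (fun acc word =>
      if !(PySem.Set.contains pvFiller (PySem.Str.lower word)) || decide (acc.length < 3)
      then acc ++ [word] else acc) acc
    = acc ++ ws.filter (fun w => !(PySem.Set.contains pvFiller (PySem.Str.lower w))) := by
  induction ws generalizing acc with
  | nil => simp
  | cons w ws ih =>
    have hlt : decide (acc.length < 3) = false := by simp; omega
    by_cases hc : PySem.Str.lower w ∈ pvFiller
    · have hstep : (if (!(PySem.Set.contains pvFiller (PySem.Str.lower w)) || decide (acc.length < 3)) = true
          then acc ++ [w] else acc) = acc := by simp [hc, hlt]
      simp only [List.foldl_cons, hstep]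
      rw [ih acc h]
      simp [hc]
    · have hstep : (if (!(PySem.Set.contains pvFiller (PySem.Str.lower w)) || decide (acc.length < 3)) = true
          then acc ++ [w] else acc) = acc ++ [w] := by simp [hc]
      simp only [List.foldl_cons, hstep]
      rw [ih (acc ++ [w]) (by simp; omega)]
      simp [hc]

-- A's loop on the empty accumulator is take 3 ++ filter of drop 3
theorem pv_loop_eq (ws : List String) :
    ws.foldl (fun acc word =>
      if !(PySem.Set.contains pvFiller (PySem.Str.lower word)) || decide (acc.length < 3)
      then acc ++ [word] else acc) []
    = ws.take 3 ++ (ws.drop 3).filter (fun w => !(PySem.Set.contains pvFiller (PySem.Str.lower w))) := by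
  match ws with
  | [] => simp
  | [a] => simp
  | [a, b] => simp only [List.foldl_cons, List.foldl_nil,
      pv_step_lt3 [] a (by simp)]; simp
  | a :: b :: c :: rest =>
    simp only [List.foldl_cons,
      pv_step_lt3 [] a (by simp), pv_step_lt3 ([] ++ [a]) b (by simp),
      pv_step_lt3 ([] ++ [a] ++ [b]) c (by simp)]
    rw [pv_loop_ge3 rest ([] ++ [a] ++ [b] ++ [c]) (by simp)]
    simp

-- join " " over a cons, when every element of the tail is nonempty
theorem pv_join_cons (w : String) (L : List String) (hL : ∀ x ∈ L, x ≠ "") :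
    PySem.Str.join " " (w :: L)
      = if PySem.Str.join " " L = "" then w else w ++ " " ++ PySem.Str.join " " L := by
  cases L with
  | nil =>
    have h0 : PySem.Str.join " " ([] : List String) = "" := by
      apply String.ext; simp [PySem.Str.toList_join, PySem.Chars.join, List.intercalate]
    rw [h0, if_pos rfl]
    apply String.ext
    simp [PySem.Str.toList_join, PySem.Chars.join, List.intercalate]
  | cons x L' =>
    have hx : x ≠ "" := hL x (by simp)
    have hne : PySem.Str.join " " (x :: L') ≠ "" := by
      intro hc
      have := congrArg String.toList hc
      rw [PySem.Str.toList_join] at this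
      rcases L' with _ | ⟨y, L''⟩
      · simp [PySem.Chars.join, List.intercalate] at this
        exact hx this
      · rw [show (List.map String.toList (x :: y :: L'')) = x.toList :: y.toList :: List.map String.toList L'' from rfl,
          PySem.Chars.join_cons_cons] at this
        simp at this
    rw [if_neg hne]
    apply String.ext
    rw [PySem.Str.toList_join,
      show (List.map String.toList (w :: x :: L')) = w.toList :: x.toList :: List.map String.toList L' from rfl,
      PySem.Chars.join_cons_cons]
    simp [PySem.Str.toList_join]

-- B's recursion computes join " " (take keep ++ filter of drop keep)
theorem pv_go_eq (ws : List String) (hne : ∀ w ∈ ws, w ≠ "") (keep : Nat) :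
    pvGo ws keep
      = PySem.Str.join " " (ws.take keep ++
          (ws.drop keep).filter (fun w => !(PySem.Set.contains pvFiller (PySem.Str.lower w)))) := by
  induction ws generalizing keep with
  | nil =>
    apply String.ext
    simp [pvGo, PySem.Str.toList_join, PySem.Chars.join, List.intercalate]
  | cons w rest ih =>
    have hw : w ≠ "" := hne w (by simp)
    have hrest : ∀ x ∈ rest, x ≠ "" := fun x hx => hne x (by simp [hx])
    have hL : ∀ x ∈ rest.take (keep - 1) ++
        (rest.drop (keep - 1)).filter (fun w => !(PySem.Set.contains pvFiller (PySem.Str.lower w))), x ≠ "" := by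
      intro x hx
      rcases List.mem_append.1 hx with h | h
      · exact hrest x (List.mem_of_mem_take h)
      · exact hrest x (List.mem_of_mem_drop (List.mem_of_mem_filter h))
    by_cases hk : keep = 0
    · subst hk
      by_cases hc : PySem.Str.lower w ∈ pvFiller
      · rw [show pvGo (w :: rest) 0 = pvGo rest 0 from by simp [pvGo, hc]]
        rw [ih hrest 0]
        simp [hc]
      · have hstep : pvGo (w :: rest) 0
            = (if pvGo rest 0 = "" then w else w ++ " " ++ pvGo rest 0) := by
          simp [pvGo, hc]
        rw [hstep, ih hrest 0]
        rw [show ((w :: rest).take 0 ++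
            ((w :: rest).drop 0).filter (fun w => !(PySem.Set.contains pvFiller (PySem.Str.lower w))))
            = w :: (rest.take 0 ++ (rest.drop 0).filter (fun w => !(PySem.Set.contains pvFiller (PySem.Str.lower w)))) from by simp [hc]]
        rw [pv_join_cons w _ (by simpa using hL)]
    · have hstep : pvGo (w :: rest) keep
          = (if pvGo rest (keep - 1) = "" then w else w ++ " " ++ pvGo rest (keep - 1)) := by
        simp [pvGo, hk]
      rw [hstep, ih hrest (keep - 1)]
      obtain ⟨k, rfl⟩ : ∃ k, keep = k + 1 := ⟨keep - 1, by omega⟩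
      rw [show ((w :: rest).take (k + 1) ++
          ((w :: rest).drop (k + 1)).filter (fun w => !(PySem.Set.contains pvFiller (PySem.Str.lower w))))
          = w :: (rest.take k ++ (rest.drop k).filter (fun w => !(PySem.Set.contains pvFiller (PySem.Str.lower w)))) from by simp]
      rw [pv_join_cons w _ (by simpa using hL)]
      simp

-- every token of split₀ is nonempty: invariant of the tokenizer's worker
theorem pv_split₀_go_ne (s cur : List Char) (acc : List (List Char))
    (hacc : ∀ w ∈ acc, w ≠ []) :
    ∀ w ∈ PySem.Chars.split₀.go s cur acc, w ≠ [] := by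
  induction s generalizing cur acc with
  | nil =>
    intro w hw
    unfold PySem.Chars.split₀.go at hw
    by_cases hc : cur.isEmpty = true
    · rw [if_pos hc] at hw
      exact hacc w (List.mem_reverse.1 hw)
    · rw [if_neg hc] at hw
      rcases List.mem_cons.1 (List.mem_reverse.1 hw) with h | h
      · rw [h]
        simp only [ne_eq, List.reverse_eq_nil_iff]
        simpa [List.isEmpty_iff] using hc
      · exact hacc w h
  | cons c rest ih =>
    intro w hw
    unfold PySem.Chars.split₀.go at hw
    by_cases hs : PySem.Chars.isspace c = true
    · rw [if_pos hs] at hw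
      by_cases hc : cur.isEmpty = true
      · rw [if_pos hc] at hw; exact ih [] acc hacc w hw
      · rw [if_neg hc] at hw
        refine ih [] (cur.reverse :: acc) ?_ w hw
        intro y hy
        rcases List.mem_cons.1 hy with h | h
        · rw [h]
          simp only [ne_eq, List.reverse_eq_nil_iff]
          simpa [List.isEmpty_iff] using hc
        · exact hacc y h
    · rw [if_neg hs] at hw
      exact ih (c :: cur) acc hacc w hw

theorem pv_split₀_ne (m : String) : ∀ w ∈ PySem.Str.split₀ m, w ≠ "" := by
  intro w hw
  rw [PySem.Str.split₀] at hw
  rcases List.mem_map.1 hw with ⟨cs, hcs, rfl⟩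
  have hne : cs ≠ [] := pv_split₀_go_ne m.toList [] [] (by simp) cs hcs
  intro hc
  apply hne
  have := congrArg String.toList hc
  simpa using this

-- ===== VERDICT (by name: the statement is the Claim_ definition above) =====
theorem semantic_compression_py_spec : Claim_equal_semantic_compression_py := by
  intro message context _
  unfold Spec_semantic_compression_py semantic_compression_py semantic_compression_py_alt
  simp only [pv_loop_eq, pv_go_eq (PySem.Str.split₀ message) (pv_split₀_ne message) 3]
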